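-- pv_equiv track=rewrite | github.com/MorDavid/Hashcat-MCP | hashcat_mcp_server.py | _parse_hash_info
-- ===== SOURCE A (Python) =====
-- from typing import Dict, List, Optional, Any, Tuple
--
-- def _parse_hash_info(output: str) -> Dict[str, Any]:
--     """Parse hash info output"""
--     info = {}
--     current_mode = None
--
--     for line in output.split('\n'):
--         if line.strip().startswith('Hash mode #'):
--             current_mode = line.strip()
--             info[current_mode] = []
--         elif current_mode and line.strip():
--             info[current_mode].append(line.strip())
--
--     return info
-- ===== SOURCE B (Python) =====
-- def _parse_hash_info(output: str):
--     """Parse hash info output (index-then-slice decomposition)."""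
--     lines = [ln.strip() for ln in output.split('\n')]
--     marks = [(i, ln) for i, ln in enumerate(lines) if ln.startswith('Hash mode #')]
--     ends = [i for i, _ in marks[1:]] + [len(lines)]
--     return {hdr: [ln for ln in lines[s + 1:e] if ln] for (s, hdr), e in zip(marks, ends)}
-- ===== Notes on version B (the rewrite author's own statement) =====
-- stated objective: alternative
-- what changed: Replaces the stateful single pass threading current_mode through a dict-append loop by a two-phase index-then-slice structure: first collect the positions of all header lines, then build each entry from the slice of stripped lines between consecutive headers via a dict comprehension (last-wins on duplicate headers, pre-header lines ignored by construction).
import Mathlib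
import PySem

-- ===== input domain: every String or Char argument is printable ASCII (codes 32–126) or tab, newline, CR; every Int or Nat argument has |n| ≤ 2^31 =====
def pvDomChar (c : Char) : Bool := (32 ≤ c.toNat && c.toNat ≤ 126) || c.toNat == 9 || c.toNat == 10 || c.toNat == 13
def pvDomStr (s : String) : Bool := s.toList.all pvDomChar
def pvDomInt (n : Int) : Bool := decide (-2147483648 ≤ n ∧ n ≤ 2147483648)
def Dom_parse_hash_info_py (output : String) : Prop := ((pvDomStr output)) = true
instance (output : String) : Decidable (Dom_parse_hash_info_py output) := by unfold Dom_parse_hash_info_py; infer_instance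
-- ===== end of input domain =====

-- B replaces A's stateful single pass (threaded current_mode) by a two-phase index-then-slice
-- decomposition; same return value, proved equal on all inputs.

-- ===== PORT A =====
-- literal transliteration of A's single pass: state = (info dict, current_mode);
-- `info[current_mode].append(...)` is Dict.modify (the key is always present when current_mode is set);
-- `current_mode and line.strip()` is the truthiness test `m ≠ "" ∧ strip line ≠ ""`.
def parse_hash_info_py (output : String) : List (String × List String) :=
  (((PySem.Str.split? output "\n").getD []).foldl
    (fun (st : PySem.Dict String (List String) × Option String) line =>
      if PySem.Str.startswith (PySem.Str.strip line) "Hash mode #" then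
        (st.1.insert (PySem.Str.strip line) [], some (PySem.Str.strip line))
      else
        match st.2 with
        | some m =>
            if m ≠ "" ∧ PySem.Str.strip line ≠ "" then
              (st.1.modify m [] (fun v => v ++ [PySem.Str.strip line]), st.2)
            else st
        | none => st)
    (PySem.Dict.empty, none)).1.items

-- ===== PORT B =====
-- literal transliteration of Source B: strip all lines, enumerate the header positions,
-- pair each header with the next header's index (or len(lines)), then a dict comprehension
-- over the slices (ported as a foldl of Dict.insert, Python's last-wins semantics).
def parse_hash_info_py_alt (output : String) : List (String × List String) :=
  let lines := ((PySem.Str.split? output "\n").getD []).map PySem.Str.strip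
  let marks := (PySem.List.enumerate lines 0).filter
      (fun p => PySem.Str.startswith p.2 "Hash mode #")
  let ends := (marks.drop 1).map (·.1) ++ [(lines.length : Int)]
  ((marks.zip ends).foldl
    (fun (d : PySem.Dict String (List String)) pe =>
      d.insert pe.1.2
        ((PySem.List.slice lines (some (pe.1.1 + 1)) (some pe.2)).filter (fun l => l ≠ "")))
    PySem.Dict.empty).items

-- ===== PRECONDITION & SPEC =====
def Spec_parse_hash_info_py (output : String) (out : List (String × List String)) : Prop := out = parse_hash_info_py_alt output
instance (output : String) (out : List (String × List String)) : Decidable (Spec_parse_hash_info_py output out) := by unfold Spec_parse_hash_info_py; infer_instance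

-- ===== CLAIM (what is proved, stated in full; the proofs are below) =====
def Claim_equal_parse_hash_info_py : Prop := ∀ (output : String), Dom_parse_hash_info_py output → Spec_parse_hash_info_py output (parse_hash_info_py output)

-- ===== LEMMAS AND PROOFS =====

def pvIsHdr (s : String) : Bool := PySem.Str.startswith s "Hash mode #"

-- A's loop step, over an already-stripped line
def pvStepA (st : PySem.Dict String (List String) × Option String) (l : String) :
    PySem.Dict String (List String) × Option String :=
  if pvIsHdr l then (st.1.insert l [], some l)
  else
    match st.2 with
    | some m => if m ≠ "" ∧ l ≠ "" then (st.1.modify m [] (fun v => v ++ [l]), st.2) else st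
    | none => st

-- block-structured middle form both ports are reduced to
def pvMid (d : PySem.Dict String (List String)) : List String → PySem.Dict String (List String)
  | [] => d
  | l :: t =>
    if pvIsHdr l then
      pvMid (d.insert l ((t.takeWhile (fun x => !pvIsHdr x)).filter (fun x => x ≠ "")))
        (t.dropWhile (fun x => !pvIsHdr x))
    else pvMid d t
termination_by ls => ls.length
decreasing_by
  · have := List.length_dropWhile_le (p := fun x => !pvIsHdr x) (l := t); simp; omega
  · simp

theorem pvMid_nil (d : PySem.Dict String (List String)) : pvMid d [] = d := by
  simp [pvMid]

theorem pvMid_cons_hdr (d : PySem.Dict String (List String)) (l : String) (t : List String)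
    (h : pvIsHdr l = true) :
    pvMid d (l :: t)
      = pvMid (d.insert l ((t.takeWhile (fun x => !pvIsHdr x)).filter (fun x => x ≠ "")))
          (t.dropWhile (fun x => !pvIsHdr x)) := by
  rw [pvMid]; simp [h]

theorem pvMid_cons_not (d : PySem.Dict String (List String)) (l : String) (t : List String)
    (h : pvIsHdr l = false) : pvMid d (l :: t) = pvMid d t := by
  rw [pvMid]; simp [h]

theorem pvMid_dropWhile (t : List String) : ∀ d,
    pvMid d (t.dropWhile (fun x => !pvIsHdr x)) = pvMid d t := by
  induction t with
  | nil => intro d; simp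
  | cons l t ih =>
    intro d
    by_cases h : pvIsHdr l
    · rw [List.dropWhile_cons]; simp [h]
    · rw [List.dropWhile_cons]; simp [h, pvMid_cons_not d l t (by simp [h]), ih]

theorem pvHdr_ne {l : String} (h : pvIsHdr l = true) : l ≠ "" := by
  intro h'; subst h'; exact absurd h (by decide)

theorem pvModify_insert (d : PySem.Dict String (List String)) (m : String) (v : List String)
    (f : List String → List String) : (d.insert m v).modify m [] f = d.insert m (f v) := by
  simp [PySem.Dict.modify, PySem.Dict.getD_insert_self, PySem.Dict.insert_insert_self]

theorem pvA_some (t : List String) : ∀ (d : PySem.Dict String (List String)) (m : String)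
    (v : List String), m ≠ "" →
    (t.foldl pvStepA (d.insert m v, some m)).1
      = pvMid (d.insert m (v ++ (t.takeWhile (fun x => !pvIsHdr x)).filter (fun x => x ≠ "")))
          (t.dropWhile (fun x => !pvIsHdr x)) := by
  induction t with
  | nil => intro d m v hm; simp [pvMid_nil]
  | cons l t ih =>
    intro d m v hm
    by_cases hl : pvIsHdr l
    · have h1 : pvStepA (d.insert m v, some m) l = ((d.insert m v).insert l [], some l) := by
        simp [pvStepA, hl]
      rw [List.foldl_cons, h1, ih _ l [] (pvHdr_ne hl)]
      rw [List.takeWhile_cons, List.dropWhile_cons]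
      simp only [hl, Bool.not_true, List.filter_nil, List.append_nil, Bool.false_eq_true,
        if_false, List.nil_append]
      rw [pvMid_cons_hdr _ l t hl]
    · by_cases he : l = ""
      · subst he
        have h1 : pvStepA (d.insert m v, some m) "" = (d.insert m v, some m) := by
          simp [pvStepA, hl]
        rw [List.foldl_cons, h1, ih _ m v hm]
        rw [List.takeWhile_cons, List.dropWhile_cons]
        simp [hl]
      · have h1 : pvStepA (d.insert m v, some m) l
            = (d.insert m (v ++ [l]), some m) := by
          simp [pvStepA, hl, hm, he, pvModify_insert]
        rw [List.foldl_cons, h1, ih _ m (v ++ [l]) hm]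
        rw [List.takeWhile_cons, List.dropWhile_cons]
        simp [hl, he]

theorem pvA_none (t : List String) : ∀ (d : PySem.Dict String (List String)),
    (t.foldl pvStepA (d, none)).1 = pvMid d t := by
  induction t with
  | nil => intro d; simp [pvMid_nil]
  | cons l t ih =>
    intro d
    by_cases hl : pvIsHdr l
    · have h1 : pvStepA (d, none) l = (d.insert l [], some l) := by simp [pvStepA, hl]
      rw [List.foldl_cons, h1, pvA_some t _ l [] (pvHdr_ne hl), pvMid_cons_hdr d l t hl]
      simp
    · have h1 : pvStepA (d, none) l = (d, none) := by simp [pvStepA, hl]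
      rw [List.foldl_cons, h1, ih d, pvMid_cons_not d l t (by simp [hl])]

-- B-side structure
def pvShift (p : Int × String) : Int × String := (p.1 + 1, p.2)

def pvMk (ls : List String) : List (Int × String) :=
  (PySem.List.enumerate ls 0).filter (fun p => pvIsHdr p.2)

def pvPairs (M : List (Int × String)) (L : Int) : List ((Int × String) × Int) :=
  M.zip ((M.drop 1).map (·.1) ++ [L])

def pvBody (ls : List String) (d : PySem.Dict String (List String))
    (pe : (Int × String) × Int) : PySem.Dict String (List String) :=
  d.insert pe.1.2
    ((PySem.List.slice ls (some (pe.1.1 + 1)) (some pe.2)).filter (fun l => l ≠ ""))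

def pvFold (ls : List String) (d : PySem.Dict String (List String))
    (P : List ((Int × String) × Int)) : PySem.Dict String (List String) :=
  P.foldl (pvBody ls) d

def pvHead (M : List (Int × String)) (K : Int) : Int := ((M.head?.map (·.1)).getD K)

theorem pvEnumerate_shift (xs : List String) : ∀ (s : Int),
    PySem.List.enumerate xs (s + 1) = (PySem.List.enumerate xs s).map pvShift := by
  induction xs with
  | nil => intro s; simp [PySem.List.enumerate_nil]
  | cons x t ih => intro s; simp [PySem.List.enumerate_cons, pvShift, ih]

theorem pvMk_cons (l : String) (t : List String) :
    pvMk (l :: t) = (if pvIsHdr l then [((0 : Int), l)] else []) ++ (pvMk t).map pvShift := by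
  unfold pvMk
  rw [PySem.List.enumerate_cons, pvEnumerate_shift, List.filter_cons, List.filter_map]
  have hc : ((fun p => pvIsHdr p.2) ∘ pvShift) = (fun (p : Int × String) => pvIsHdr p.2) := rfl
  rw [hc]
  by_cases h : pvIsHdr l <;> simp [h]

theorem pvMem_mk_nonneg {t : List String} {p : Int × String} (h : p ∈ pvMk t) : 0 ≤ p.1 := by
  rw [pvMk, List.mem_filter] at h
  obtain ⟨h1, _⟩ := h
  rw [PySem.List.mem_enumerate_iff] at h1
  obtain ⟨k, hk, rfl⟩ := h1
  simp

theorem pvPairs_cons (m0 : Int × String) (M : List (Int × String)) (K : Int) :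
    pvPairs (m0 :: M) K = (m0, pvHead M K) :: pvPairs M K := by
  cases M with
  | nil => simp [pvPairs, pvHead]
  | cons q Q => simp [pvPairs, pvHead]

theorem pvPairs_map_shift (M : List (Int × String)) (L : Int) :
    pvPairs (M.map pvShift) (L + 1)
      = (pvPairs M L).map (Prod.map pvShift (· + 1)) := by
  unfold pvPairs
  rw [← List.zip_map]
  congr 1
  simp [List.map_drop, List.map_map, Function.comp_def, pvShift]

theorem pvSlice_cons_shift (x : String) (xs : List String) (a b : Int)
    (ha : 0 ≤ a) (hb : 0 ≤ b) :
    PySem.List.slice (x :: xs) (some (a + 1)) (some (b + 1))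
      = PySem.List.slice xs (some a) (some b) := by
  obtain ⟨n, rfl⟩ := Int.eq_ofNat_of_zero_le ha
  obtain ⟨m, rfl⟩ := Int.eq_ofNat_of_zero_le hb
  have h1 : ((n : Int) + 1) = ((n + 1 : Nat) : Int) := by push_cast; ring
  have h2 : ((m : Int) + 1) = ((m + 1 : Nat) : Int) := by push_cast; ring
  rw [h1, h2, PySem.List.slice_natCast, PySem.List.slice_natCast]
  simp [Nat.succ_sub_succ]

theorem pvFold_shift (M : List (Int × String)) (L : Int) (l : String) (ls : List String)
    (d : PySem.Dict String (List String)) (hM : ∀ p ∈ M, 0 ≤ p.1) (hL : 0 ≤ L) :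
    pvFold (l :: ls) d (pvPairs (M.map pvShift) (L + 1)) = pvFold ls d (pvPairs M L) := by
  rw [pvPairs_map_shift]
  unfold pvFold
  rw [List.foldl_map]
  apply PySem.List.foldl_congr_mem
  intro acc pe hpe
  have h1 : pe.1 ∈ M := (List.of_mem_zip hpe).1
  have h2 : pe.2 ∈ (M.drop 1).map (·.1) ++ [L] := (List.of_mem_zip hpe).2
  have ha : 0 ≤ pe.1.1 := hM _ h1
  have hb : 0 ≤ pe.2 := by
    rcases List.mem_append.1 h2 with h | h
    · obtain ⟨q, hq, hq2⟩ := List.mem_map.1 h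
      rw [← hq2]
      exact hM _ (List.mem_of_mem_drop hq)
    · simp at h; omega
  simp only [pvBody, Prod.map, pvShift]
  rw [pvSlice_cons_shift _ _ _ _ (by omega) hb]

theorem pvHead_map_shift (M : List (Int × String)) (K : Int) :
    pvHead (M.map pvShift) (K + 1) = pvHead M K + 1 := by
  cases M <;> simp [pvHead, pvShift]

theorem pvHead_mk (t : List String) :
    pvHead (pvMk t) (t.length : Int)
      = (((t.takeWhile (fun x => !pvIsHdr x)).length : Nat) : Int) := by
  induction t with
  | nil => simp [pvMk, pvHead]
  | cons x r ih =>
    by_cases h : pvIsHdr x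
    · rw [pvMk_cons]
      simp [h, pvHead, List.takeWhile_cons]
    · rw [pvMk_cons]
      have hl : ((x :: r).length : Int) = (r.length : Int) + 1 := by
        simp [List.length_cons]
      rw [hl]
      simp only [h, Bool.false_eq_true, if_false, List.nil_append]
      rw [pvHead_map_shift, ih, List.takeWhile_cons]
      simp [h]

def pvBgo (ls : List String) (d : PySem.Dict String (List String)) :
    PySem.Dict String (List String) :=
  pvFold ls d (pvPairs (pvMk ls) (ls.length : Int))

theorem pvB_eq (ls : List String) : ∀ d, pvBgo ls d = pvMid d ls := by
  induction ls with
  | nil => intro d; simp [pvBgo, pvMk, pvPairs, pvFold, pvMid_nil]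
  | cons l t ih =>
    intro d
    have hl : ((l :: t).length : Int) = (t.length : Int) + 1 := by simp [List.length_cons]
    have hMt : ∀ p ∈ pvMk t, 0 ≤ p.1 := fun p hp => pvMem_mk_nonneg hp
    by_cases h : pvIsHdr l
    · rw [pvBgo, pvMk_cons, hl]
      simp only [h, if_true, List.cons_append, List.nil_append]
      rw [pvPairs_cons]
      have hfold : pvFold (l :: t) d
          ((((0 : Int), l), pvHead ((pvMk t).map pvShift) ((t.length : Int) + 1))
            :: pvPairs ((pvMk t).map pvShift) ((t.length : Int) + 1))
          = pvFold (l :: t)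
              (pvBody (l :: t) d
                (((0 : Int), l), pvHead ((pvMk t).map pvShift) ((t.length : Int) + 1)))
              (pvPairs ((pvMk t).map pvShift) ((t.length : Int) + 1)) := rfl
      rw [hfold, pvFold_shift _ _ _ _ _ hMt (by positivity)]
      have hbody : pvBody (l :: t) d
            (((0 : Int), l), pvHead ((pvMk t).map pvShift) ((t.length : Int) + 1))
          = d.insert l ((t.takeWhile (fun x => !pvIsHdr x)).filter (fun x => x ≠ "")) := by
        rw [pvBody, pvHead_map_shift, pvHead_mk]
        rw [pvSlice_cons_shift l t 0 _ (by omega) (by positivity)]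
        have htk : t.takeWhile (fun x => !pvIsHdr x)
            = t.take (t.takeWhile (fun x => !pvIsHdr x)).length :=
          List.prefix_iff_eq_take.mp (List.takeWhile_prefix _)
        simp only [PySem.List.slice_zero_start, PySem.List.slice_to_natCast]
        rw [← htk]
      rw [hbody]
      show pvBgo t _ = _
      rw [ih, pvMid_cons_hdr d l t h, pvMid_dropWhile t]
    · rw [pvBgo, pvMk_cons, hl]
      simp only [h, Bool.false_eq_true, if_false, List.nil_append]
      rw [pvFold_shift _ _ _ _ _ hMt (by positivity)]
      show pvBgo t d = _
      rw [ih, pvMid_cons_not d l t (by simp [h])]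

-- ===== VERDICT (by name: the statement is the Claim_ definition above) =====
theorem parse_hash_info_py_spec : Claim_equal_parse_hash_info_py := by
  intro output _
  unfold Spec_parse_hash_info_py
  have hb : parse_hash_info_py_alt output
      = (pvBgo (((PySem.Str.split? output "\n").getD []).map PySem.Str.strip)
          PySem.Dict.empty).items := rfl
  have ha : parse_hash_info_py output
      = (((((PySem.Str.split? output "\n").getD []).map PySem.Str.strip).foldl pvStepA
          (PySem.Dict.empty, none)).1).items := by
    unfold parse_hash_info_py
    rw [List.foldl_map]
    rfl
  rw [ha, hb, pvB_eq, ← pvA_none]
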